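-- pv_equiv track=rewrite | github.com/taufiqhusada/amr-to-text-indonesia | preprocess/graph_utils.py | split_and_handle_duplicate_nodes_in_linearized_penman
-- ===== SOURCE A (Python) =====
-- from collections import defaultdict
--
-- def split_and_handle_duplicate_nodes_in_linearized_penman(linearized_penman):
--     splitted_linearized_penman = linearized_penman.split()
--     map_node_id = defaultdict(lambda: 0)
--     for i in range(len(splitted_linearized_penman)):
--         item = splitted_linearized_penman[i]
--         if (item != '(' and item != ')' and ':' not in item): # node
--             node_with_id = item + '-' + str(map_node_id[item])
--             map_node_id[item]+=1
--             splitted_linearized_penman[i] = node_with_id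
--     return splitted_linearized_penman
-- ===== SOURCE B (Python) =====
-- def relabel(result, tokens, t):
--     # one full pass: number every occurrence of the original token t
--     k = 0
--     res = []
--     for r, u in zip(result, tokens):
--         if u == t:
--             res.append(t + '-' + str(k))
--             k += 1
--         else:
--             res.append(r)
--     return res
--
-- def split_and_handle_duplicate_nodes_in_linearized_penman(linearized_penman):
--     tokens = linearized_penman.split()
--     result = tokens
--     seen = set()
--     for t in tokens:
--         if t != '(' and t != ')' and ':' not in t and t not in seen:
--             seen.add(t)
--             result = relabel(result, tokens, t)
--     return result
-- ===== Notes on version B (the rewrite author's own statement) =====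
-- stated objective: alternative
-- what changed: Replaced A's single mutating pass with a running defaultdict counter by a group-by-token scheme: for each distinct node token (tracked with a seen-set, in first-occurrence order) B makes one full functional relabelling pass that numbers all occurrences of that token against the original token list.
import Mathlib
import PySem

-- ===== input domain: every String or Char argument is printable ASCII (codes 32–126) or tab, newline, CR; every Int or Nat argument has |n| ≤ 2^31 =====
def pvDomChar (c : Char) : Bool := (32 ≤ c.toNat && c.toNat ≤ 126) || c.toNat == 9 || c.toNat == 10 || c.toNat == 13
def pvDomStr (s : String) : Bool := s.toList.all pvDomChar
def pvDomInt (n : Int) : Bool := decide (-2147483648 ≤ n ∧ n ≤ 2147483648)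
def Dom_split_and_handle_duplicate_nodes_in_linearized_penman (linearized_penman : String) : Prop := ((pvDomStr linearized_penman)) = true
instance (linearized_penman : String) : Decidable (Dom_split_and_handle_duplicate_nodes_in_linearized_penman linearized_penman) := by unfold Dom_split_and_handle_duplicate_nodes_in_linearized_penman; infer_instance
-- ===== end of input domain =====

-- B replaces A's single mutating pass with a running defaultdict counter by a group-by-token
-- scheme: for each distinct node token (seen-set, first-occurrence order) one full functional
-- relabelling pass numbers all occurrences of that token (objective: alternative, not faster).

-- ===== PORT A =====
-- A's loop: one left-to-right pass mutating the token list, with a defaultdict counter of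
-- occurrences seen so far; ported as structural recursion over (remaining tokens, counter dict).
def pvGoA : List String → PySem.Dict String Int → List String
  | [], _ => []
  | item :: rest, d =>
    if item ≠ "(" ∧ item ≠ ")" ∧ PySem.Str.isIn ":" item = false then
      let c := d.getD item 0
      (item ++ "-" ++ PySem.Int.toStr c) :: pvGoA rest (d.insert item (c + 1))
    else
      item :: pvGoA rest d

def split_and_handle_duplicate_nodes_in_linearized_penman (linearized_penman : String) : List String :=
  pvGoA (PySem.Str.split₀ linearized_penman) PySem.Dict.empty

-- ===== PORT B =====
-- relabel(result, tokens, t): one pass over zip(result, tokens), numbering occurrences of t.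
def pvRelabel : List (String × String) → String → Int → List String
  | [], _, _ => []
  | (r, u) :: rest, t, k =>
    if u = t then (t ++ "-" ++ PySem.Int.toStr k) :: pvRelabel rest t (k + 1)
    else r :: pvRelabel rest t k

-- B's outer loop over the tokens with the seen-set, rebinding result per fresh node token.
def pvOuterB (tokens : List String) : List String → List String → PySem.Set String → List String
  | [], result, _ => result
  | t :: rest, result, seen =>
    if t ≠ "(" ∧ t ≠ ")" ∧ PySem.Str.isIn ":" t = false ∧ PySem.Set.contains seen t = false then
      pvOuterB tokens rest (pvRelabel (result.zip tokens) t 0) (PySem.Set.add seen t)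
    else
      pvOuterB tokens rest result seen

def split_and_handle_duplicate_nodes_in_linearized_penman_alt (linearized_penman : String) : List String :=
  let tokens := PySem.Str.split₀ linearized_penman
  pvOuterB tokens tokens tokens PySem.Set.empty

-- ===== PRECONDITION & SPEC =====
def Spec_split_and_handle_duplicate_nodes_in_linearized_penman (linearized_penman : String) (out : List String) : Prop := out = split_and_handle_duplicate_nodes_in_linearized_penman_alt linearized_penman
instance (linearized_penman : String) (out : List String) : Decidable (Spec_split_and_handle_duplicate_nodes_in_linearized_penman linearized_penman out) := by unfold Spec_split_and_handle_duplicate_nodes_in_linearized_penman; infer_instance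

-- ===== CLAIM (what is proved, stated in full; the proofs are below) =====
def Claim_equal_split_and_handle_duplicate_nodes_in_linearized_penman : Prop := ∀ (linearized_penman : String), Dom_split_and_handle_duplicate_nodes_in_linearized_penman linearized_penman → Spec_split_and_handle_duplicate_nodes_in_linearized_penman linearized_penman (split_and_handle_duplicate_nodes_in_linearized_penman linearized_penman)

-- ===== LEMMAS AND PROOFS =====

-- Common specification: each node token labelled with the count of equal tokens before it.
def pvSpecGo (pre : List String) : List String → List String
  | [] => []
  | u :: rest =>
    (if u ≠ "(" ∧ u ≠ ")" ∧ PySem.Str.isIn ":" u = false then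
      u ++ "-" ++ PySem.Int.toStr ((pre.count u : Int)) else u) :: pvSpecGo (pre ++ [u]) rest

-- Partially-labelled list: only tokens in `seen` are labelled yet.
def pvPartialGo (seen : List String) (pre : List String) : List String → List String
  | [] => []
  | u :: rest =>
    (if u ∈ seen then u ++ "-" ++ PySem.Int.toStr ((pre.count u : Int)) else u)
      :: pvPartialGo seen (pre ++ [u]) rest

lemma pvPartialGo_nil_seen : ∀ (l pre : List String), pvPartialGo [] pre l = l := by
  intro l
  induction l with
  | nil => intro pre; rfl
  | cons u rest ih => intro pre; simp [pvPartialGo, ih]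

lemma pvPartialGo_eq_spec : ∀ (l pre seen : List String),
    (∀ u ∈ l, (u ∈ seen ↔ (u ≠ "(" ∧ u ≠ ")" ∧ PySem.Str.isIn ":" u = false))) →
    pvPartialGo seen pre l = pvSpecGo pre l := by
  intro l
  induction l with
  | nil => intro pre seen _; rfl
  | cons u rest ih =>
    intro pre seen h
    have hu := h u (by simp)
    simp only [pvPartialGo, pvSpecGo]
    refine List.cons_eq_cons.mpr ⟨?_, ih (pre ++ [u]) seen (fun x hx => h x (by simp [hx]))⟩
    by_cases hn : u ≠ "(" ∧ u ≠ ")" ∧ PySem.Str.isIn ":" u = false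
    · rw [if_pos (hu.mpr hn), if_pos hn]
    · rw [if_neg (fun hm => hn (hu.mp hm)), if_neg hn]

-- One relabelling pass for a fresh token t turns the partial labelling for `seen`
-- into the partial labelling for `seen ++ [t]`.
lemma pvRelabel_partial (seen : List String) (t : String) (ht : t ∉ seen) :
    ∀ (suf pre : List String),
      pvRelabel ((pvPartialGo seen pre suf).zip suf) t ((pre.count t : Int)) =
        pvPartialGo (seen ++ [t]) pre suf := by
  intro suf
  induction suf with
  | nil => intro pre; rfl
  | cons u rest ih =>
    intro pre
    simp only [pvPartialGo, List.zip_cons_cons, pvRelabel]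
    by_cases hut : u = t
    · subst hut
      have hus : u ∉ seen := ht
      rw [if_neg hus, if_pos rfl, if_pos (by simp)]
      refine List.cons_eq_cons.mpr ⟨rfl, ?_⟩
      have hcnt : ((pre ++ [u]).count u : Int) = (pre.count u : Int) + 1 := by
        simp [List.count_append]
      rw [← hcnt, ih (pre ++ [u])]
    · have hcnt : ((pre ++ [u]).count t : Int) = (pre.count t : Int) := by
        simp [List.count_append, List.count_eq_zero, Ne.symm hut]
      by_cases hus : u ∈ seen
      · rw [if_pos hus, if_neg hut, if_pos (by simp [hus])]
        exact List.cons_eq_cons.mpr ⟨rfl, by rw [← hcnt, ih (pre ++ [u])]⟩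
      · rw [if_neg hus, if_neg hut, if_neg (by simp [hus, hut])]
        exact List.cons_eq_cons.mpr ⟨rfl, by rw [← hcnt, ih (pre ++ [u])]⟩

-- Outer loop invariant: result is the partial labelling for seen; seen holds only node
-- tokens; every node token of the whole list not in the remaining suffix is in seen.
lemma pvOuterB_eq (tokens : List String) :
    ∀ (suf : List String) (seen : PySem.Set String) (result : List String),
      (∀ u ∈ seen, u ≠ "(" ∧ u ≠ ")" ∧ PySem.Str.isIn ":" u = false) →
      result = pvPartialGo seen [] tokens →
      (∀ u ∈ tokens, u ∉ suf → (u ≠ "(" ∧ u ≠ ")" ∧ PySem.Str.isIn ":" u = false) → u ∈ seen) →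
      pvOuterB tokens suf result seen = pvSpecGo [] tokens := by
  intro suf
  induction suf with
  | nil =>
    intro seen result h1 h2 h3
    simp only [pvOuterB]
    rw [h2]
    exact pvPartialGo_eq_spec tokens [] seen
      (fun u hu => ⟨fun hm => h1 u hm, fun hn => h3 u hu (by simp) hn⟩)
  | cons t rest ih =>
    intro seen result h1 h2 h3
    simp only [pvOuterB]
    by_cases hc : t ≠ "(" ∧ t ≠ ")" ∧ PySem.Str.isIn ":" t = false ∧
        PySem.Set.contains seen t = false
    · rw [if_pos hc]
      have htn : t ∉ seen := by
        intro hm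
        have := (PySem.Set.contains_iff seen t).mpr hm
        rw [hc.2.2.2] at this
        exact Bool.false_ne_true this
      have hadd : PySem.Set.add seen t = seen ++ [t] := by
        simp [PySem.Set.add, htn]
      rw [hadd]
      apply ih (seen ++ [t])
      · intro u hu
        rcases List.mem_append.mp hu with h | h
        · exact h1 u h
        · rw [List.mem_singleton.mp h]; exact ⟨hc.1, hc.2.1, hc.2.2.1⟩
      · rw [h2]
        have := pvRelabel_partial seen t htn tokens []
        simpa using this
      · intro u hu hur hn
        by_cases hut : u = t
        · simp [hut]
        · exact List.mem_append.mpr (Or.inl (h3 u hu (by simp [hur, hut]) hn))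
    · rw [if_neg hc]
      apply ih seen result h1 h2
      intro u hu hur hn
      by_cases hut : u = t
      · subst hut
        -- the loop condition failed, but u is a node token, so contains seen u must be true
        by_cases hcon : PySem.Set.contains seen u = false
        · exact absurd ⟨hn.1, hn.2.1, hn.2.2, hcon⟩ hc
        · exact (PySem.Set.contains_iff seen u).mp (Bool.of_not_eq_false hcon)
      · exact h3 u hu (by simp [hur, hut]) hn

-- A's running-counter pass also computes the prefix-count specification.
lemma pvGoA_eq : ∀ (l pre : List String) (d : PySem.Dict String Int),
    (∀ x, x ≠ "(" ∧ x ≠ ")" ∧ PySem.Str.isIn ":" x = false →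
      d.getD x 0 = (pre.count x : Int)) →
    pvGoA l d = pvSpecGo pre l := by
  intro l
  induction l with
  | nil => intro pre d _; rfl
  | cons t rest ih =>
    intro pre d hd
    by_cases hc : t ≠ "(" ∧ t ≠ ")" ∧ PySem.Str.isIn ":" t = false
    · simp only [pvGoA, pvSpecGo, if_pos hc]
      refine List.cons_eq_cons.mpr ⟨by rw [hd t hc], ?_⟩
      apply ih (pre ++ [t])
      intro x hx
      rw [PySem.Dict.getD_insert]
      by_cases hxt : x = t
      · subst hxt
        simp [hd x hx, List.count_append]
      · simp [hxt, hd x hx, List.count_append, Ne.symm hxt]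
    · simp only [pvGoA, pvSpecGo, if_neg hc]
      refine List.cons_eq_cons.mpr ⟨rfl, ?_⟩
      apply ih (pre ++ [t])
      intro x hx
      have hxt : x ≠ t := by rintro rfl; exact hc hx
      rw [hd x hx, List.count_append, List.count_singleton]
      simp [Ne.symm hxt]

-- ===== VERDICT (by name: the statement is the Claim_ definition above) =====
theorem split_and_handle_duplicate_nodes_in_linearized_penman_spec : Claim_equal_split_and_handle_duplicate_nodes_in_linearized_penman := by
  intro s _
  show _ = _
  unfold split_and_handle_duplicate_nodes_in_linearized_penman
    split_and_handle_duplicate_nodes_in_linearized_penman_alt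
  rw [pvGoA_eq (PySem.Str.split₀ s) [] PySem.Dict.empty (by intro x _; rfl)]
  rw [pvOuterB_eq (PySem.Str.split₀ s) (PySem.Str.split₀ s) PySem.Set.empty
    (PySem.Str.split₀ s) (by intro u hu; cases hu)
    ((pvPartialGo_nil_seen _ _).symm)
    (fun u hu hur _ => absurd hu hur)]
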